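-- pv_equiv track=rewrite | github.com/birc-gsa-2022/cigar-python-Troelsmou | src/align.py | local_align
-- ===== SOURCE A (Python) =====
-- def local_align(p: str, x: str, i: int, edits: str) -> tuple((str, str)):
--     """Align two sequences from a sequence of edits.
--     Args:
--         p (str): The read string we have mapped against x
--         x (str): The longer string we have mapped against
--         i (int): The location where we have an approximative match
--         edits (str): The list of edits to apply, given as a string
--     Returns:
--         tuple[str, str]: The two rows in the pairwise alignment
--     >>> local_align("ACCACAGTCATA", "GTACAGAGTACAAA", 2, "MDMMMMMMIMMMM")
--     ('ACCACAGT-CATA', 'A-CAGAGTACAAA')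
--     """
--     x = x[i:]
--     read = ""
--     ref = ""
--     deletions = 0 # Keeps track of deletions and insertions
--     insertions = 0 # Critique is welcomed, couldn't find another way to make it work
--     for i in range(len(edits)):
--         if edits[i] == "M":
--             read += p[i - insertions] # Inserts a base based on how many bases are in the alignment already
--             ref += x[i - deletions]
--         if edits[i] == "D":
--             read += p[i - insertions]
--             ref += "-"
--             deletions += 1
--         if edits[i] == "I":
--             ref += x[i - deletions]
--             read += "-"
--             insertions += 1
--
--     return (read, ref)
-- ===== SOURCE B (Python) =====
-- def local_align(p: str, x: str, i: int, edits: str) -> tuple((str, str)):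
--     x = x[i:]
--     # Row 1: the read. Consumes one base of p for every edit op except an
--     # insertion, and shows a gap exactly on insertions.
--     read = []
--     j = 0
--     for op in edits:
--         if op == "I":
--             read.append("-")
--         else:
--             if op == "M" or op == "D":
--                 read.append(p[j])
--             j += 1
--     # Row 2: the reference. Consumes one base of x for every edit op except a
--     # deletion, and shows a gap exactly on deletions.
--     ref = []
--     k = 0
--     for op in edits:
--         if op == "D":
--             ref.append("-")
--         else:
--             if op == "M" or op == "I":
--                 ref.append(x[k])
--             k += 1
--     return ("".join(read), "".join(ref))
-- ===== Notes on version B (the rewrite author's own statement) =====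
-- stated objective: alternative
-- what changed: Replaces A's single interleaved pass with shared deletion/insertion counters by two independent single-output passes: one builds the read row with its own pointer into p, the other builds the reference row with its own pointer into x[i:].
import Mathlib
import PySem

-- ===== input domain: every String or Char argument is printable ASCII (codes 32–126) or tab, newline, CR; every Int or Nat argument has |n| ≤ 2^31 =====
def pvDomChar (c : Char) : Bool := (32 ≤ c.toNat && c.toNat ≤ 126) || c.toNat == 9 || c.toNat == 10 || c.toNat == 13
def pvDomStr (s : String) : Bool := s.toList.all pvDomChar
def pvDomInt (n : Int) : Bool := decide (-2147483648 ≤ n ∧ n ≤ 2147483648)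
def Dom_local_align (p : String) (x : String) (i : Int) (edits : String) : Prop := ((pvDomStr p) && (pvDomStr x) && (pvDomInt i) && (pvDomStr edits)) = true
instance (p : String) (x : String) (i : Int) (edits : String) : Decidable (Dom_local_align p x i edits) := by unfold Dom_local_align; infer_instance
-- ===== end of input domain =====

-- B builds each alignment row in its own pass with its own string pointer, instead of A's
-- single interleaved pass with shared deletion/insertion counters (objective: alternative).

-- s[k] under Pre_ the index is in range; the ' ' default is never reached inside Pre_
def pvCh (s : List Char) (k : Int) : Char := (PySem.List.pyGet? s k).getD ' '

-- ===== PORT A =====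
-- state: (read, ref, deletions, insertions); i is the loop index of `for i in range(len(edits))`
def localAlignGoA (p xs : List Char) : List Char → Int → List Char → List Char → Int → Int → List Char × List Char
  | [], _, read, ref, _, _ => (read, ref)
  | c :: rest, i, read, ref, del, ins =>
    let s1 := if c = 'M' then (read ++ [pvCh p (i - ins)], ref ++ [pvCh xs (i - del)], del, ins)
              else (read, ref, del, ins)
    let s2 := if c = 'D' then (s1.1 ++ [pvCh p (i - s1.2.2.2)], s1.2.1 ++ ['-'], s1.2.2.1 + 1, s1.2.2.2)
              else s1
    let s3 := if c = 'I' then (s2.1 ++ ['-'], s2.2.1 ++ [pvCh xs (i - s2.2.2.1)], s2.2.2.1, s2.2.2.2 + 1)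
              else s2
    localAlignGoA p xs rest (i + 1) s3.1 s3.2.1 s3.2.2.1 s3.2.2.2

def local_align (p : String) (x : String) (i : Int) (edits : String) : String × String :=
  let xs := PySem.List.slice x.toList (some i) none   -- x = x[i:]
  let r := localAlignGoA p.toList xs edits.toList 0 [] [] 0 0
  (String.ofList r.1, String.ofList r.2)

-- ===== PORT B =====
-- first pass: the read row, pointer j into p (advances on every op except 'I')
def localAlignRead (p : List Char) : List Char → Int → List Char → List Char
  | [], _, acc => acc
  | c :: rest, j, acc =>
    if c = 'I' then localAlignRead p rest j (acc ++ ['-'])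
    else if c = 'M' ∨ c = 'D' then localAlignRead p rest (j + 1) (acc ++ [pvCh p j])
    else localAlignRead p rest (j + 1) acc

-- second pass: the reference row, pointer k into x[i:] (advances on every op except 'D')
def localAlignRef (xs : List Char) : List Char → Int → List Char → List Char
  | [], _, acc => acc
  | c :: rest, k, acc =>
    if c = 'D' then localAlignRef xs rest k (acc ++ ['-'])
    else if c = 'M' ∨ c = 'I' then localAlignRef xs rest (k + 1) (acc ++ [pvCh xs k])
    else localAlignRef xs rest (k + 1) acc

def local_align_alt (p : String) (x : String) (i : Int) (edits : String) : String × String :=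
  let xs := PySem.List.slice x.toList (some i) none   -- x = x[i:]
  (String.ofList (localAlignRead p.toList edits.toList 0 []),
   String.ofList (localAlignRef xs edits.toList 0 []))

-- ===== PRECONDITION & SPEC =====
-- Pre_ excludes exactly the inputs where Python A raises IndexError: some 'M'/'D' op reads p,
-- or some 'M'/'I' op reads x[i:], past its end.
def Pre_local_align (p : String) (x : String) (i : Int) (edits : String) : Prop :=
  ∀ t : Nat, t < edits.toList.length →
    ((edits.toList.getD t ' ' = 'M' ∨ edits.toList.getD t ' ' = 'D') →
      t - (edits.toList.take t).count 'I' < p.toList.length) ∧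
    ((edits.toList.getD t ' ' = 'M' ∨ edits.toList.getD t ' ' = 'I') →
      t - (edits.toList.take t).count 'D' < (PySem.List.slice x.toList (some i) none).length)
instance (p : String) (x : String) (i : Int) (edits : String) : Decidable (Pre_local_align p x i edits) := by unfold Pre_local_align; infer_instance

def pvWitness_local_align : String × String × Int × String := ("ACCACAGTCATA", "GTACAGAGTACAAA", 2, "MDMMMMMMIMMMM")

def Spec_local_align (p : String) (x : String) (i : Int) (edits : String) (out : String × String) : Prop := out = local_align_alt p x i edits
instance (p : String) (x : String) (i : Int) (edits : String) (out : String × String) : Decidable (Spec_local_align p x i edits out) := by unfold Spec_local_align; infer_instance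

-- ===== CLAIM (what is proved, stated in full; the proofs are below) =====
def Claim_equal_local_align : Prop := ∀ (p : String) (x : String) (i : Int) (edits : String), Dom_local_align p x i edits → Pre_local_align p x i edits → Spec_local_align p x i edits (local_align p x i edits)

-- ===== LEMMAS AND PROOFS =====

-- the interleaved pass computes both independent passes at once: i - ins is the read pointer,
-- i - del is the reference pointer
lemma localAlignGoA_eq (p xs : List Char) : ∀ (es : List Char) (i : Int) (read ref : List Char) (del ins : Int),
    localAlignGoA p xs es i read ref del ins =
      (localAlignRead p es (i - ins) read, localAlignRef xs es (i - del) ref) := by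
  intro es
  induction es with
  | nil => intro i read ref del ins; simp [localAlignGoA, localAlignRead, localAlignRef]
  | cons c rest ih =>
    intro i read ref del ins
    by_cases hM : c = 'M'
    · subst hM
      have h1 : i + 1 - ins = i - ins + 1 := by ring
      have h2 : i + 1 - del = i - del + 1 := by ring
      simp [localAlignGoA, localAlignRead, localAlignRef, ih, h1, h2]
    · by_cases hD : c = 'D'
      · subst hD
        have h1 : i + 1 - ins = i - ins + 1 := by ring
        have h2 : i + 1 - (del + 1) = i - del := by ring
        simp [localAlignGoA, localAlignRead, localAlignRef, ih, h1, h2]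
      · by_cases hI : c = 'I'
        · subst hI
          have h1 : i + 1 - (ins + 1) = i - ins := by ring
          have h2 : i + 1 - del = i - del + 1 := by ring
          simp [localAlignGoA, localAlignRead, localAlignRef, ih, h1, h2]
        · have h1 : i + 1 - ins = i - ins + 1 := by ring
          have h2 : i + 1 - del = i - del + 1 := by ring
          simp [localAlignGoA, localAlignRead, localAlignRef, hM, hD, hI, ih, h1, h2]

-- ===== VERDICT (by name: the statement is the Claim_ definition above) =====
theorem local_align_spec : Claim_equal_local_align := by
  intro p x i edits _ _
  simp [Spec_local_align, local_align, local_align_alt, localAlignGoA_eq]
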